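-- pv_equiv track=rewrite | github.com/Ashmit-Ag/mugen-transformer | model/composer/music_theory.py | get_nearest_scale_note
-- ===== SOURCE A (Python) =====
-- def is_note_in_scale(note, scale):
--     """
--     Check if a note is in a given scale.
--
--     Args:
--         note (int): MIDI note number to check
--         scale (list): List of MIDI note numbers in the scale
--
--     Returns:
--         bool: True if the note is in the scale, False otherwise
--     """
--     # Get the pitch class (0-11) of the note
--     pitch_class = note % 12
--
--     # Check if any note in the scale has the same pitch class
--     for scale_note in scale:
--         if scale_note % 12 == pitch_class:
--             return True
--
--     return False
--
-- def get_nearest_scale_note(note, scale):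
--     """
--     Find the nearest note in a scale to a given note.
--
--     Args:
--         note (int): MIDI note number to find the nearest scale note for
--         scale (list): List of MIDI note numbers in the scale
--
--     Returns:
--         int: MIDI note number of the nearest scale note
--     """
--     if is_note_in_scale(note, scale):
--         return note
--
--     # Find the nearest note in the scale
--     nearest_note = None
--     min_distance = float('inf')
--
--     for scale_note in scale:
--         distance = abs(note - scale_note)
--         if distance < min_distance:
--             min_distance = distance
--             nearest_note = scale_note
--
--     return nearest_note
-- ===== SOURCE B (Python) =====
-- def get_nearest_scale_note(note, scale):
--     """Single fused pass: return note on first pitch-class match, else track nearest."""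
--     pitch_class = note % 12
--     nearest_note = None
--     min_distance = float('inf')
--     for scale_note in scale:
--         if scale_note % 12 == pitch_class:
--             return note
--         distance = abs(note - scale_note)
--         if distance < min_distance:
--             min_distance = distance
--             nearest_note = scale_note
--     return nearest_note
-- ===== Notes on version B (the rewrite author's own statement) =====
-- stated objective: simpler
-- what changed: Fused A's two passes (membership helper, then a separate min-distance loop) into one loop that returns note on the first pitch-class match and otherwise tracks the nearest element.
import Mathlib
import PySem

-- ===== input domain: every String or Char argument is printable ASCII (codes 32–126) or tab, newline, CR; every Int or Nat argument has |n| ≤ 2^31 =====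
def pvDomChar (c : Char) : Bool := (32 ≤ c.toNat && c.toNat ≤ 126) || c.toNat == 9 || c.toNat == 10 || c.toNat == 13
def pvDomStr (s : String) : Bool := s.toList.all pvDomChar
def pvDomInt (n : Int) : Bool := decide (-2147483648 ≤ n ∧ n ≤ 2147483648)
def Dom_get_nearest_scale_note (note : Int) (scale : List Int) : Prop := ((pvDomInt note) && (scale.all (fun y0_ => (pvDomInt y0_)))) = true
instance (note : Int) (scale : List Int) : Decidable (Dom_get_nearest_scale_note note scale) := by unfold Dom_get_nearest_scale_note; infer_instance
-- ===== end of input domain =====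

-- B fuses A's two passes (membership helper + separate min-distance loop) into one loop; same O(n) cost, simpler.

-- ===== PORT A =====
-- helper: the 'for scale_note in scale: if scale_note % 12 == pitch_class: return True' loop
def isNoteInScaleGo (pitch_class : Int) : List Int → Bool
  | [] => false
  | s :: rest => if PySem.Int.mod s 12 == pitch_class then true else isNoteInScaleGo pitch_class rest

def is_note_in_scale (note : Int) (scale : List Int) : Bool :=
  let pitch_class := PySem.Int.mod note 12
  isNoteInScaleGo pitch_class scale

-- A's second loop; min_distance = float('inf') is modelled as 'none' (the only non-int value it
-- ever holds; any int distance compares < inf), nearest_note starts as None.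
def aNearestLoop (note : Int) : List Int → Option Int × Option Int → Option Int × Option Int
  | [], st => st
  | s :: rest, (nearest, minD) =>
    let d := |note - s|
    match minD with
    | none => aNearestLoop note rest (some s, some d)          -- d < inf: update
    | some m =>
      if d < m then aNearestLoop note rest (some s, some d)
      else aNearestLoop note rest (nearest, some m)

def get_nearest_scale_note (note : Int) (scale : List Int) : Option Int :=
  if is_note_in_scale note scale then some note
  else (aNearestLoop note scale (none, none)).1

-- ===== PORT B =====
-- B's single loop: early return on pitch-class match, otherwise strict-< nearest tracking.
def bLoop (note pitch_class : Int) : List Int → Option Int → Option Int → Option Int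
  | [], nearest, _ => nearest
  | s :: rest, nearest, minD =>
    if PySem.Int.mod s 12 == pitch_class then some note
    else
      let d := |note - s|
      match minD with
      | none => bLoop note pitch_class rest (some s) (some d)
      | some m =>
        if d < m then bLoop note pitch_class rest (some s) (some d)
        else bLoop note pitch_class rest nearest (some m)

def get_nearest_scale_note_alt (note : Int) (scale : List Int) : Option Int :=
  bLoop note (PySem.Int.mod note 12) scale none none

-- ===== PRECONDITION & SPEC =====
def Spec_get_nearest_scale_note (note : Int) (scale : List Int) (out : Option Int) : Prop := out = get_nearest_scale_note_alt note scale
instance (note : Int) (scale : List Int) (out : Option Int) : Decidable (Spec_get_nearest_scale_note note scale out) := by unfold Spec_get_nearest_scale_note; infer_instance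

-- ===== CLAIM (what is proved, stated in full; the proofs are below) =====
def Claim_equal_get_nearest_scale_note : Prop := ∀ (note : Int) (scale : List Int), Dom_get_nearest_scale_note note scale → Spec_get_nearest_scale_note note scale (get_nearest_scale_note note scale)

-- ===== LEMMAS AND PROOFS =====

-- Combined invariant: for any loop state, A's "membership check, else min loop" equals B's fused loop.
theorem a_eq_b_go (note : Int) (scale : List Int) :
    ∀ (nearest minD : Option Int),
      (if isNoteInScaleGo (PySem.Int.mod note 12) scale then some note
       else (aNearestLoop note scale (nearest, minD)).1)
        = bLoop note (PySem.Int.mod note 12) scale nearest minD := by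
  induction scale with
  | nil => intro nearest minD; simp [isNoteInScaleGo, aNearestLoop, bLoop]
  | cons s rest ih =>
    intro nearest minD
    by_cases h : PySem.Int.mod s 12 == PySem.Int.mod note 12
    · have h' : PySem.Int.mod s 12 = PySem.Int.mod note 12 := eq_of_beq h
      have h2 : note % 12 = s % 12 := by
        have := h'.symm; simpa using this
      simp [isNoteInScaleGo, bLoop, h2.symm]
    · cases minD with
      | none =>
        simp only [isNoteInScaleGo, aNearestLoop, bLoop, h, if_false, Bool.false_eq_true]
        exact ih (some s) (some |note - s|)
      | some m =>
        by_cases hd : |note - s| < m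
        · simp only [isNoteInScaleGo, aNearestLoop, bLoop, h, hd, if_false,
            Bool.false_eq_true]
          exact ih (some s) (some |note - s|)
        · simp only [isNoteInScaleGo, aNearestLoop, bLoop, h, hd, if_false,
            Bool.false_eq_true]
          exact ih nearest (some m)

-- ===== VERDICT (by name: the statement is the Claim_ definition above) =====
theorem get_nearest_scale_note_spec : Claim_equal_get_nearest_scale_note := by
  intro note scale _
  unfold Spec_get_nearest_scale_note get_nearest_scale_note get_nearest_scale_note_alt
    is_note_in_scale
  exact a_eq_b_go note scale none none
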